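-- pv_equiv track=rewrite | github.com/younes-ferhat/supply-chain-predictor | app.py | smart_column_detection
-- ===== SOURCE A (Python) =====
-- def smart_column_detection(columns, keywords, exclude_keywords=None):
--     if exclude_keywords is None: exclude_keywords = []
--     col_lower = [str(c).lower() for c in columns]
--     for key in keywords:
--         for i, col in enumerate(col_lower):
--             if key in col:
--                 if not any(bad in col for bad in exclude_keywords):
--                     return columns[i]
--     return None
-- ===== SOURCE B (Python) =====
-- def smart_column_detection(columns, keywords, exclude_keywords=None):
--     if exclude_keywords is None:
--         exclude_keywords = []
--     best = None  # (rank, original column)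
--     for c in columns:
--         cl = str(c).lower()
--         if any(bad in cl for bad in exclude_keywords):
--             continue
--         rank = None
--         for r, k in enumerate(keywords):
--             if k in cl:
--                 rank = r
--                 break
--         if rank is None:
--             continue
--         if best is None or rank < best[0]:
--             best = (rank, c)
--     return best[1] if best is not None else None
-- ===== Notes on version B (the rewrite author's own statement) =====
-- stated objective: faster
-- what changed: Inverted the loop nesting: instead of A's keyword-outer scan that rescans every column (and re-runs the exclusion test) for each keyword, B makes a single column-major pass computing each non-excluded column's keyword rank (index of the first matching keyword, breaking early) and keeps the argmin by (rank, column order).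
import Mathlib
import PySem

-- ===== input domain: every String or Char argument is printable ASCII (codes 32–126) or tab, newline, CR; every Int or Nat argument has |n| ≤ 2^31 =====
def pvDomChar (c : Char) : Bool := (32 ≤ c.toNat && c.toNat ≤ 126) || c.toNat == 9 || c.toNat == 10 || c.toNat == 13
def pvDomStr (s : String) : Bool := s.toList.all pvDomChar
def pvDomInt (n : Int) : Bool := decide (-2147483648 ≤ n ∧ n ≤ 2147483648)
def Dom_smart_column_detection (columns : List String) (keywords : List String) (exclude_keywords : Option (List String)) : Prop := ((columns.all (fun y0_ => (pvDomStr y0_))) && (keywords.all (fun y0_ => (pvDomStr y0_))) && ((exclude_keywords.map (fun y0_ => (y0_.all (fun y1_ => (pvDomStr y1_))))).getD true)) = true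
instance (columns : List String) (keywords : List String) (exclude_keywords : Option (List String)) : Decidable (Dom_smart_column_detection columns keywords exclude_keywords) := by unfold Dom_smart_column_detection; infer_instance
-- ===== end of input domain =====

-- B inverts A's keyword-outer early-return scan (which rescans all columns per keyword) into one column-major pass keeping the argmin by (keyword rank, column order); measurably faster on the generated timing inputs.


-- ===== PORT A =====
-- inner 'for i, col in enumerate(col_lower)' scan for one keyword (pairs = columns zipped with their lowered form)
def pvAFind (exk : List String) (key : String) : List (String × String) → Option String
  | [] => none
  | (c, lc) :: rest =>
    if PySem.Str.isIn key lc then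
      if exk.any (fun bad => PySem.Str.isIn bad lc) then pvAFind exk key rest
      else some c
    else pvAFind exk key rest

-- outer 'for key in keywords' loop with early return
def pvALoop (exk : List String) (pairs : List (String × String)) : List String → Option String
  | [] => none
  | k :: ks =>
    match pvAFind exk k pairs with
    | some c => some c
    | none => pvALoop exk pairs ks

def smart_column_detection (columns : List String) (keywords : List String) (exclude_keywords : Option (List String)) : Option String :=
  let exk := exclude_keywords.getD []
  let col_lower := columns.map PySem.Str.lower
  pvALoop exk (columns.zip col_lower) keywords

-- ===== PORT B =====
-- rank of a lowered column: index of the first keyword contained in it (B's inner 'for r, k in enumerate(keywords): … break')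
def pvRank (keywords : List String) (lc : String) : Option Nat :=
  keywords.findIdx? (fun k => PySem.Str.isIn k lc)

-- B's loop body: skip excluded columns, keep best = (rank, original column) with strict rank improvement
def pvBStep (keywords : List String) (exk : List String) (best : Option (Nat × String)) (c : String) : Option (Nat × String) :=
  let cl := PySem.Str.lower c
  if exk.any (fun bad => PySem.Str.isIn bad cl) then best
  else
    match pvRank keywords cl with
    | none => best
    | some r =>
      match best with
      | none => some (r, c)
      | some (rb, _) => if r < rb then some (r, c) else best

def smart_column_detection_alt (columns : List String) (keywords : List String) (exclude_keywords : Option (List String)) : Option String :=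
  let exk := exclude_keywords.getD []
  (columns.foldl (pvBStep keywords exk) none).map Prod.snd

-- ===== PRECONDITION & SPEC =====
def Spec_smart_column_detection (columns : List String) (keywords : List String) (exclude_keywords : Option (List String)) (out : Option String) : Prop := out = smart_column_detection_alt columns keywords exclude_keywords
instance (columns : List String) (keywords : List String) (exclude_keywords : Option (List String)) (out : Option String) : Decidable (Spec_smart_column_detection columns keywords exclude_keywords out) := by unfold Spec_smart_column_detection; infer_instance

-- ===== CLAIM (what is proved, stated in full; the proofs are below) =====
def Claim_equal_smart_column_detection : Prop := ∀ (columns : List String) (keywords : List String) (exclude_keywords : Option (List String)), Dom_smart_column_detection columns keywords exclude_keywords → Spec_smart_column_detection columns keywords exclude_keywords (smart_column_detection columns keywords exclude_keywords)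

-- ===== LEMMAS AND PROOFS =====

theorem pvRank_cons (k : String) (ks : List String) (lc : String) :
    pvRank (k :: ks) lc = if PySem.Str.isIn k lc then some 0 else (pvRank ks lc).map (· + 1) := by
  cases h : PySem.Str.isIn k lc <;> simp only [PySem.Str.isIn] at h <;>
    simp [pvRank, List.findIdx?_cons, h]

-- once best has rank 0, the fold never changes it
theorem pvFold_zero_absorb (keywords exk : List String) (cb : String) (cols : List String) :
    cols.foldl (pvBStep keywords exk) (some (0, cb)) = some (0, cb) := by
  induction cols with
  | nil => rfl
  | cons c cs ih =>
    have hstep : pvBStep keywords exk (some (0, cb)) c = some (0, cb) := by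
      cases hex : (exk.any fun bad => PySem.Str.isIn bad (PySem.Str.lower c)) <;>
        simp only [pvBStep, hex] <;> simp <;>
        cases pvRank keywords (PySem.Str.lower c) <;> simp
    rw [List.foldl_cons, hstep, ih]

-- with no keywords the fold does nothing
theorem pvFold_nil_keys (exk : List String) (cols : List String) (b : Option (Nat × String)) :
    cols.foldl (pvBStep [] exk) b = b := by
  induction cols generalizing b with
  | nil => rfl
  | cons c cs ih =>
    have hstep : pvBStep [] exk b c = b := by
      cases hex : (exk.any fun bad => PySem.Str.isIn bad (PySem.Str.lower c)) <;>
        simp only [pvBStep, hex, pvRank] <;> simp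
    rw [List.foldl_cons, hstep, ih]

-- if the first clean column containing k is c, the (k :: ks)-fold returns (0, c), provided best has positive rank so far
theorem pvFold_first_zero (k : String) (ks exk : List String) (cols : List String) (c : String)
    (b : Option (Nat × String))
    (hb : b = none ∨ ∃ rb cb, b = some (rb, cb) ∧ 0 < rb)
    (h : pvAFind exk k (cols.zip (cols.map PySem.Str.lower)) = some c) :
    cols.foldl (pvBStep (k :: ks) exk) b = some (0, c) := by
  induction cols generalizing b with
  | nil => simp [pvAFind] at h
  | cons c0 cs ih =>
    simp only [List.map_cons, List.zip_cons_cons, pvAFind] at h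
    cases hex : (exk.any fun bad => PySem.Str.isIn bad (PySem.Str.lower c0)) with
    | true =>
      have hstep : pvBStep (k :: ks) exk b c0 = b := by
        simp only [pvBStep, hex]; simp
      cases hin : PySem.Str.isIn k (PySem.Str.lower c0) <;> simp only [hin, hex] at h <;>
        simp at h <;> rw [List.foldl_cons, hstep] <;> exact ih b hb h
    | false =>
      cases hin : PySem.Str.isIn k (PySem.Str.lower c0) with
      | true =>
        simp only [hin, hex] at h; simp at h; subst h
        have hstep : pvBStep (k :: ks) exk b c0 = some (0, c0) := by
          simp only [pvBStep, hex, pvRank_cons, hin]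
          rcases hb with rfl | ⟨rb, cb, rfl, hrb⟩
          · simp
          · simp [hrb]
        rw [List.foldl_cons, hstep, pvFold_zero_absorb]
      | false =>
        simp only [hin] at h; simp at h
        cases hr : pvRank ks (PySem.Str.lower c0) with
        | none =>
          have hstep : pvBStep (k :: ks) exk b c0 = b := by
            simp only [pvBStep, hex, pvRank_cons, hin, hr]; simp
          rw [List.foldl_cons, hstep]; exact ih b hb h
        | some r =>
          rcases hb with rfl | ⟨rb, cb, rfl, hrb⟩
          · have hstep : pvBStep (k :: ks) exk none c0 = some (r + 1, c0) := by
              simp only [pvBStep, hex, pvRank_cons, hin, hr]; simp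
            rw [List.foldl_cons, hstep]
            exact ih _ (Or.inr ⟨r + 1, c0, rfl, by omega⟩) h
          · by_cases hlt : r + 1 < rb
            · have hstep : pvBStep (k :: ks) exk (some (rb, cb)) c0 = some (r + 1, c0) := by
                simp only [pvBStep, hex, pvRank_cons, hin, hr]
                simp only [Option.map_some]
                split_ifs <;> simp_all
              rw [List.foldl_cons, hstep]
              exact ih _ (Or.inr ⟨r + 1, c0, rfl, by omega⟩) h
            · have hstep : pvBStep (k :: ks) exk (some (rb, cb)) c0 = some (rb, cb) := by
                simp only [pvBStep, hex, pvRank_cons, hin, hr]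
                simp only [Option.map_some]
                split_ifs <;> simp_all
              rw [List.foldl_cons, hstep]
              exact ih _ (Or.inr ⟨rb, cb, rfl, hrb⟩) h

-- pvAFind = none means: every clean column fails to contain k
theorem pvAFind_none (k : String) (exk : List String) (cols : List String)
    (h : pvAFind exk k (cols.zip (cols.map PySem.Str.lower)) = none) :
    ∀ c ∈ cols, (exk.any fun bad => PySem.Str.isIn bad (PySem.Str.lower c)) = false →
      PySem.Str.isIn k (PySem.Str.lower c) = false := by
  induction cols with
  | nil => intro c hc; simp at hc
  | cons c0 cs ih =>
    simp only [List.map_cons, List.zip_cons_cons, pvAFind] at h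
    intro c hc hclean
    cases hin : PySem.Str.isIn k (PySem.Str.lower c0) with
    | true =>
      cases hex : (exk.any fun bad => PySem.Str.isIn bad (PySem.Str.lower c0)) with
      | true =>
        simp only [hin, hex] at h; simp at h
        rcases List.mem_cons.mp hc with rfl | hc
        · cases hclean.symm.trans hex
        · exact ih h c hc hclean
      | false => simp only [hin, hex] at h; simp at h
    | false =>
      simp only [hin] at h; simp at h
      rcases List.mem_cons.mp hc with rfl | hc
      · exact hin
      · exact ih h c hc hclean

-- dropping a keyword no clean column matches shifts all ranks by one and changes nothing else
theorem pvFold_shift (k : String) (ks exk : List String) (cols : List String)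
    (b : Option (Nat × String))
    (h : ∀ c ∈ cols, (exk.any fun bad => PySem.Str.isIn bad (PySem.Str.lower c)) = false →
      PySem.Str.isIn k (PySem.Str.lower c) = false) :
    cols.foldl (pvBStep (k :: ks) exk) (b.map (fun p => (p.1 + 1, p.2))) =
      (cols.foldl (pvBStep ks exk) b).map (fun p => (p.1 + 1, p.2)) := by
  induction cols generalizing b with
  | nil => rfl
  | cons c0 cs ih =>
    have htail : ∀ c ∈ cs, (exk.any fun bad => PySem.Str.isIn bad (PySem.Str.lower c)) = false →
        PySem.Str.isIn k (PySem.Str.lower c) = false := fun c hc => h c (by simp [hc])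
    have hstep : pvBStep (k :: ks) exk (b.map (fun p => (p.1 + 1, p.2))) c0 =
        (pvBStep ks exk b c0).map (fun p => (p.1 + 1, p.2)) := by
      cases hex : (exk.any fun bad => PySem.Str.isIn bad (PySem.Str.lower c0)) with
      | true => simp only [pvBStep, hex]; simp
      | false =>
        have hin : PySem.Str.isIn k (PySem.Str.lower c0) = false := h c0 (by simp) hex
        simp only [pvBStep, hex, pvRank_cons, hin]
        cases hr : pvRank ks (PySem.Str.lower c0) with
        | none => simp
        | some r =>
          cases b with
          | none => simp
          | some p =>
            obtain ⟨rb, cb⟩ := p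
            simp only [Option.map_some]
            split_ifs <;> simp_all
    rw [List.foldl_cons, List.foldl_cons, hstep]
    exact ih (pvBStep ks exk b c0) htail

-- main induction: A's keyword-outer loop equals B's column fold
theorem pvMain (exk : List String) (cols : List String) (keywords : List String) :
    pvALoop exk (cols.zip (cols.map PySem.Str.lower)) keywords =
      (cols.foldl (pvBStep keywords exk) none).map Prod.snd := by
  induction keywords with
  | nil => simp [pvALoop, pvFold_nil_keys]
  | cons k ks ih =>
    simp only [pvALoop]
    cases hfind : pvAFind exk k (cols.zip (cols.map PySem.Str.lower)) with
    | some c =>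
      rw [pvFold_first_zero k ks exk cols c none (Or.inl rfl) hfind]; rfl
    | none =>
      have hshift := pvFold_shift k ks exk cols none (pvAFind_none k exk cols hfind)
      simp only [Option.map_none] at hshift
      rw [hshift, ih]
      cases cols.foldl (pvBStep ks exk) none <;> rfl

-- ===== VERDICT (by name: the statement is the Claim_ definition above) =====
theorem smart_column_detection_spec : Claim_equal_smart_column_detection := by
  intro columns keywords exclude_keywords _
  unfold Spec_smart_column_detection smart_column_detection smart_column_detection_alt
  exact pvMain (exclude_keywords.getD []) columns keywords
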